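-- pv_equiv track=rewrite | github.com/GengDavid/AI-Fundation | preprocessing/text_processing.py | get_word_dict
-- ===== SOURCE A (Python) =====
-- def get_word_dict(data_list):
--     data_dict = {}
--     lines = len(data_list)
--     for i in range(lines):
--         for word in data_list[i]:
--             if((word in data_dict) == False):
--                 cnt = len(data_dict)
--                 data_dict[word] = cnt
--     return data_dict
-- ===== SOURCE B (Python) =====
-- def get_word_dict(data_list):
--     # Flatten once; walk the positions BACKWARDS so that, with plain overwriting
--     # assignment (no membership test), each word ends up mapped to its EARLIEST
--     # position.  Then sort the distinct words by that first position and enumerate.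
--     words = [w for line in data_list for w in line]
--     first = {}
--     for p in range(len(words) - 1, -1, -1):
--         first[words[p]] = p
--     return {w: i for i, w in enumerate(sorted(first, key=first.get))}
-- ===== Notes on version B (the rewrite author's own statement) =====
-- stated objective: alternative
-- what changed: Instead of A's forward pass with a membership test and a running-size counter, B flattens the words, walks the positions backwards with plain overwriting assignment so each word ends mapped to its earliest position, then sorts the distinct words by that first position and enumerates them.
import Mathlib
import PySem

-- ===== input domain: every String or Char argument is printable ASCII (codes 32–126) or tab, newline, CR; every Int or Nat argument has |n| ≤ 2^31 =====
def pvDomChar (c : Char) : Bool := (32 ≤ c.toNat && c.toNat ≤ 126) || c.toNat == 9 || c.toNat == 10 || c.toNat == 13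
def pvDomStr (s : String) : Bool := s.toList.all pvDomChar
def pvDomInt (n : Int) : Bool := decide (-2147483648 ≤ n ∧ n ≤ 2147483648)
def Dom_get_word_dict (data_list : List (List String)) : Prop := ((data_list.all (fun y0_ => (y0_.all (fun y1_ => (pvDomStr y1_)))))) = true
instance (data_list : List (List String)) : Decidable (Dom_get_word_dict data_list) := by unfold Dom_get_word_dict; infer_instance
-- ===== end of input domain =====

-- ===== PORT A =====
-- B replaces A's forward membership-tested counting loop by a backward overwrite pass
-- recording first positions, then a sort by first position (alternative algorithm).
def pvStep (d : PySem.Dict String Int) (word : String) : PySem.Dict String Int :=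
  if d.contains word = false then
    let cnt : Int := d.size
    d.insert word cnt
  else d

def get_word_dict (data_list : List (List String)) : List (String × Int) :=
  let data_dict : PySem.Dict String Int := PySem.Dict.empty
  let lines : Int := data_list.length
  let data_dict := (PySem.List.pyRange 0 lines 1).foldl
    (fun d i => (PySem.List.pyGetD data_list i []).foldl pvStep d) data_dict
  data_dict.items

-- ===== PORT B =====
-- 'first.get(w)' in Source B always hits a key; ported as getD with an unused default.
def get_word_dict_alt (data_list : List (List String)) : List (String × Int) :=
  let words := data_list.flatMap (fun line => line)
  let first : PySem.Dict String Int :=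
    (PySem.List.pyRange ((words.length : Int) - 1) (-1) (-1)).foldl
      (fun d p => d.insert (PySem.List.pyGetD words p "") p) PySem.Dict.empty
  let order := PySem.List.sorted first.keys (fun w => first.getD w 0)
  (PySem.List.enumerate order 0).map (fun p => (p.2, p.1))

-- ===== PRECONDITION & SPEC =====
def Spec_get_word_dict (data_list : List (List String)) (out : List (String × Int)) : Prop := out = get_word_dict_alt data_list
instance (data_list : List (List String)) (out : List (String × Int)) : Decidable (Spec_get_word_dict data_list out) := by unfold Spec_get_word_dict; infer_instance

-- ===== CLAIM (what is proved, stated in full; the proofs are below) =====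
def Claim_equal_get_word_dict : Prop := ∀ (data_list : List (List String)), Dom_get_word_dict data_list → Spec_get_word_dict data_list (get_word_dict data_list)

-- ===== LEMMAS AND PROOFS =====

-- ---- A side: the loop state after the unique words seen so far are u is word u[k] ↦ k
def pvSt (u : List String) : PySem.Dict String Int :=
  PySem.Dict.mk ((PySem.List.enumerate u 0).map (fun p => (p.2, p.1)))

theorem pvSt_keys (u : List String) : (pvSt u).keys = u := by
  simp [pvSt, PySem.Dict.keys, Function.comp_def, PySem.List.map_snd_enumerate]

theorem pvSt_contains (u : List String) (w : String) :
    (pvSt u).contains w = decide (w ∈ u) := by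
  rw [PySem.Dict.contains_eq_decide_mem_keys, pvSt_keys]

theorem pvStep_st (u : List String) (w : String) :
    pvStep (pvSt u) w = pvSt (PySem.Set.add u w) := by
  by_cases h : w ∈ u
  · simp [pvStep, pvSt_contains, h, PySem.Set.add, PySem.Set.contains]
  · apply PySem.Dict.ext
    have hc : (pvSt u).contains w = false := by simp [pvSt_contains, h]
    simp only [pvStep, hc]
    rw [if_pos trivial, PySem.Dict.items_insert_of_not_contains _ _ hc]
    simp [pvSt, PySem.Dict.size, PySem.Set.add, PySem.Set.contains, h,
      PySem.List.enumerate_append]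

theorem pvFold_st (ws u : List String) :
    ws.foldl pvStep (pvSt u) = pvSt (ws.foldl PySem.Set.add u) := by
  induction ws generalizing u with
  | nil => rfl
  | cons w ws ih => simp only [List.foldl_cons, pvStep_st]; exact ih _

theorem pvFoldLines (L : List (List String)) (d : PySem.Dict String Int) :
    L.foldl (fun d line => line.foldl pvStep d) d =
      (L.flatMap (fun line => line)).foldl pvStep d := by
  induction L generalizing d with
  | nil => rfl
  | cons l ls ih => simp [List.foldl_append, ih]

-- A returns the dedup'd word stream enumerated in order
theorem pvA_char (data_list : List (List String)) :
    get_word_dict data_list =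
      (PySem.List.enumerate (PySem.List.dedup (data_list.flatMap (fun line => line))) 0).map
        (fun p => (p.2, p.1)) := by
  unfold get_word_dict
  dsimp only []
  rw [PySem.List.foldl_pyRange_zero_pyGetD' data_list ([] : List String)
        (fun d line => line.foldl pvStep d) PySem.Dict.empty]
  rw [show (PySem.Dict.empty : PySem.Dict String Int) = pvSt [] from rfl, pvFoldLines, pvFold_st]
  rw [PySem.List.dedup_eq_ofList, PySem.Set.ofList_eq_foldl]
  rfl

-- ---- B side
-- keys of insert (not in the prelude's lemma list)
theorem pvKeys_insert_pos (d : PySem.Dict String Int) (k : String) (v : Int)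
    (h : d.contains k = true) : (d.insert k v).keys = d.keys := by
  simp only [PySem.Dict.insert, h, if_pos, PySem.Dict.keys, List.map_map]
  apply List.map_congr_left
  intro p _
  by_cases hp : p.1 == k
  · simp [Function.comp, hp]; exact (LawfulBEq.eq_of_beq hp).symm
  · simp [Function.comp, hp]

theorem pvKeys_insert_neg (d : PySem.Dict String Int) (k : String) (v : Int)
    (h : d.contains k = false) : (d.insert k v).keys = d.keys ++ [k] := by
  simp [PySem.Dict.insert, h, PySem.Dict.keys]

-- the dict Source B's backward loop builds over suffix ws starting at position s
def pvG : List String → Int → PySem.Dict String Int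
  | [], _ => PySem.Dict.empty
  | w :: ws, s => (pvG ws (s + 1)).insert w s

theorem pvG_get? (ws : List String) (s : Int) (w : String) :
    (pvG ws s).get? w =
      if w ∈ ws then some (s + (List.idxOf w ws : Int)) else none := by
  induction ws generalizing s with
  | nil => simp [pvG, PySem.Dict.get?, PySem.Dict.empty]
  | cons x ws ih =>
    by_cases hw : w = x
    · subst hw
      simp [pvG, PySem.Dict.get?_insert_self, List.idxOf_cons_self]
    · rw [pvG, PySem.Dict.get?_insert_of_ne _ _ hw, ih]
      have hxw : (x == w) = false := by simp [Ne.symm hw]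
      have hidx : List.idxOf w (x :: ws) = List.idxOf w ws + 1 := by
        simp [List.idxOf_cons, hxw]
      by_cases hmem : w ∈ ws
      · simp [hmem, hw, hidx]; ring
      · simp [hmem, hw]

theorem pvG_mem_keys (ws : List String) (s : Int) (w : String) :
    w ∈ (pvG ws s).keys ↔ w ∈ ws := by
  induction ws generalizing s w with
  | nil => simp [pvG, PySem.Dict.keys, PySem.Dict.empty]
  | cons x ws ih =>
    rw [pvG]
    by_cases hc : (pvG ws (s + 1)).contains x = true
    · rw [pvKeys_insert_pos _ _ _ hc]
      have hx : x ∈ ws := by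
        have := PySem.Dict.contains_eq_decide_mem_keys (pvG ws (s + 1)) x
        rw [hc] at this
        exact (ih (s + 1) x).mp (of_decide_eq_true this.symm)
      rw [ih (s + 1) w]
      simp only [List.mem_cons]
      constructor
      · exact Or.inr
      · rintro (rfl | h); exacts [hx, h]
    · rw [pvKeys_insert_neg _ _ _ (by simpa using hc)]
      simp [ih (s + 1) w, List.mem_append, or_comm]

theorem pvG_nodup_keys (ws : List String) (s : Int) : (pvG ws s).keys.Nodup := by
  induction ws generalizing s with
  | nil => simp [pvG, PySem.Dict.keys, PySem.Dict.empty]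
  | cons x ws ih =>
    rw [pvG]
    by_cases hc : (pvG ws (s + 1)).contains x = true
    · rw [pvKeys_insert_pos _ _ _ hc]; exact ih _
    · rw [pvKeys_insert_neg _ _ _ (by simpa using hc)]
      have hx : x ∉ (pvG ws (s + 1)).keys := by
        intro hmem
        have := PySem.Dict.contains_eq_decide_mem_keys (pvG ws (s + 1)) x
        simp [hmem] at this
        exact hc this
      simp [List.nodup_append, ih]
      intro a ha h
      subst h
      exact hx ha

-- the port's backward pyRange fold IS pvG words 0
theorem pvRange_rev (n : Nat) :
    PySem.List.pyRange ((n : Int) - 1) (-1) (-1) = (PySem.List.pyRange 0 (n : Int) 1).reverse := by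
  cases n with
  | zero => rfl
  | succ m =>
    have hs : ((m + 1 : Nat) : Int) - 1 = (m : Int) := by push_cast; ring
    rw [hs]
    simp only [PySem.List.pyRange]
    norm_num [Int.ediv_one]
    rw [if_pos (by omega : (-1 : Int) < (m : Int))]
    apply List.ext_getElem
    · simp
    · intro i h1 h2
      simp only [List.getElem_map, List.getElem_reverse, List.getElem_range,
        List.length_map, List.length_range]
      simp at h1
      push_cast
      omega

theorem pvFoldr_enum (ws : List String) (s : Int) :
    (PySem.List.enumerate ws s).foldr (fun p d => d.insert p.2 p.1) PySem.Dict.empty =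
      pvG ws s := by
  induction ws generalizing s with
  | nil => rfl
  | cons x ws ih => rw [PySem.List.enumerate_cons, List.foldr_cons, ih, pvG]

theorem pvFirst_eq (ws : List String) :
    (PySem.List.pyRange ((ws.length : Int) - 1) (-1) (-1)).foldl
        (fun d p => d.insert (PySem.List.pyGetD ws p "") p) PySem.Dict.empty =
      pvG ws 0 := by
  rw [pvRange_rev,
      show PySem.List.pyRange 0 (ws.length : Int) 1 = (PySem.List.enumerate ws 0).map (fun p => p.1) by
        rw [PySem.List.map_fst_enumerate, zero_add],
      ← List.map_reverse, List.foldl_map]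
  rw [PySem.List.foldl_congr_mem _ _ (fun d (p : Int × String) => d.insert p.2 p.1) _ ?_]
  · rw [List.foldl_reverse, pvFoldr_enum]
  · intro acc p hp
    rw [List.mem_reverse, PySem.List.mem_enumerate_iff] at hp
    obtain ⟨k, hk, rfl⟩ := hp
    have : PySem.List.pyGetD ws ((0 : Int) + k) "" = ws[k] := by
      rw [PySem.List.pyGetD_eq_getElem ws "" (by omega) (by omega)]
      congr 1; omega
    rw [this]

-- dedup as a foldl of Set.add, with an arbitrary accumulator
theorem pvFoldl_add_acc (ws : List String) (acc : List String) :
    ws.foldl PySem.Set.add acc =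
      acc ++ (ws.foldl PySem.Set.add []).filter (fun y => !(PySem.Set.contains acc y)) := by
  induction ws generalizing acc with
  | nil => simp
  | cons x ws ih =>
    rw [List.foldl_cons, List.foldl_cons, ih (PySem.Set.add acc x), ih (PySem.Set.add [] x)]
    have hadd0 : PySem.Set.add ([] : List String) x = [x] := rfl
    rw [hadd0, List.filter_append]
    by_cases hx : PySem.Set.contains acc x = true
    · have hxmem : x ∈ acc := by simpa [PySem.Set.contains] using hx
      have : PySem.Set.add acc x = acc := by
        simp [PySem.Set.add, PySem.Set.contains, hxmem]
      rw [this]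
      congr 1
      rw [show List.filter (fun y => !PySem.Set.contains acc y) [x] = [] by
        simp [PySem.Set.contains, hxmem]]
      rw [List.nil_append, List.filter_filter]
      apply List.filter_congr
      intro y _
      by_cases hyx : y = x
      · subst hyx; simp [PySem.Set.contains, hxmem]
      · simp [PySem.Set.contains, hyx]
    · have hxmem : x ∉ acc := by simpa [PySem.Set.contains] using hx
      have : PySem.Set.add acc x = acc ++ [x] := by
        simp [PySem.Set.add, PySem.Set.contains, hxmem]
      rw [this]
      rw [show List.filter (fun y => !PySem.Set.contains acc y) [x] = [x] by
        simp [PySem.Set.contains, hxmem]]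
      rw [List.append_assoc]
      congr 2
      rw [List.filter_filter]
      apply List.filter_congr
      intro y _
      by_cases hyx : y = x
      · subst hyx; simp [PySem.Set.contains, hxmem]
      · simp [PySem.Set.contains, List.mem_append, hyx]

-- along dedup ws, first-occurrence indices strictly increase
theorem pvDedup_pairwise (ws : List String) :
    (ws.foldl PySem.Set.add []).Pairwise
      (fun a b => List.idxOf a ws < List.idxOf b ws) := by
  induction ws with
  | nil => simp
  | cons x ws ih =>
    rw [List.foldl_cons, show PySem.Set.add ([] : List String) x = [x] from rfl,
        pvFoldl_add_acc ws [x], List.singleton_append]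
    rw [List.pairwise_cons]
    constructor
    · intro y hy
      rw [List.mem_filter] at hy
      have hyx : y ≠ x := by
        intro h; subst h
        simp [PySem.Set.contains] at hy
      rw [List.idxOf_cons_self]
      rw [show List.idxOf y (x :: ws) = List.idxOf y ws + 1 by
        simp [List.idxOf_cons, (by simp [Ne.symm hyx] : (x == y) = false)]]
      omega
    · have hsub : ((ws.foldl PySem.Set.add []).filter
          (fun y => !PySem.Set.contains [x] y)).Pairwise
            (fun a b => List.idxOf a ws < List.idxOf b ws) :=
        List.Pairwise.sublist List.filter_sublist ih
      apply hsub.imp_of_mem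
      intro a b ha hb hlt
      rw [List.mem_filter] at ha hb
      have hax : a ≠ x := by intro h; subst h; simp [PySem.Set.contains] at ha
      have hbx : b ≠ x := by intro h; subst h; simp [PySem.Set.contains] at hb
      rw [show List.idxOf a (x :: ws) = List.idxOf a ws + 1 by
            simp [List.idxOf_cons, (by simp [Ne.symm hax] : (x == a) = false)],
          show List.idxOf b (x :: ws) = List.idxOf b ws + 1 by
            simp [List.idxOf_cons, (by simp [Ne.symm hbx] : (x == b) = false)]]
      omega

-- the sort in B recovers exactly the dedup order
theorem pvSorted_eq (ws : List String) :
    PySem.List.sorted (pvG ws 0).keys (fun w => (pvG ws 0).getD w 0) =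
      PySem.List.dedup ws := by
  apply PySem.List.sorted_eq_of_perm_of_pairwise_lt
  · rw [List.perm_ext_iff_of_nodup (PySem.List.nodup_dedup ws) (pvG_nodup_keys ws 0)]
    intro a
    rw [PySem.List.mem_dedup, pvG_mem_keys]
  · have hbase := pvDedup_pairwise ws
    rw [← PySem.Set.ofList_eq_foldl, ← PySem.List.dedup_eq_ofList] at hbase
    apply hbase.imp_of_mem
    intro a b ha hb hlt
    have hga : (pvG ws 0).getD a 0 = (List.idxOf a ws : Int) := by
      rw [PySem.Dict.getD, pvG_get?, if_pos ((PySem.List.mem_dedup ws a).mp ha)]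
      simp
    have hgb : (pvG ws 0).getD b 0 = (List.idxOf b ws : Int) := by
      rw [PySem.Dict.getD, pvG_get?, if_pos ((PySem.List.mem_dedup ws b).mp hb)]
      simp
    rw [hga, hgb]
    exact_mod_cast hlt

theorem pvB_char (data_list : List (List String)) :
    get_word_dict_alt data_list =
      (PySem.List.enumerate (PySem.List.dedup (data_list.flatMap (fun line => line))) 0).map
        (fun p => (p.2, p.1)) := by
  unfold get_word_dict_alt
  dsimp only []
  rw [pvFirst_eq, pvSorted_eq]

-- ===== VERDICT (by name: the statement is the Claim_ definition above) =====
theorem get_word_dict_spec : Claim_equal_get_word_dict := by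
  intro data_list _
  show get_word_dict data_list = get_word_dict_alt data_list
  rw [pvA_char, pvB_char]
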